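-- pv_equiv track=rewrite | github.com/rish106/COL106 | a4/a4.py | modPatternMatchWildcard
-- ===== SOURCE A (Python) =====
-- def modPow(a, b, c):
--     if (b == 0):
--         return 1
--     elif (b % 2 == 0):
--         return (modPow(a, b//2, c) * modPow(a, b//2, c)) % c
--     else:
--         return ((a % c) * modPow(a, b//2, c) * modPow(a, b//2, c)) % c
--
-- def modPatternMatchWildcard(q,p,x):
--     # we change the function f() in the wildcard case by treating the substring and pattern as
--     # split at the index of the '?'
--     # so the pattern 'AA?CD' and substring 'AHDUI' is checked as
--     # f('AA') == f('AH') and f('CD') == f('UI')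
--     #
--     # m = len(p)
--     n = len(x)
--     L = [] # sorted list of indices where p matches x
--     wildIndex = p.index('?') # O(m) time
--     # wildExpValue stores the (exponent of 26 at the wildIndex in pattern) mod q
--     if (wildIndex != len(p)-1):
--         wildExpValue = modPow(26, len(p)-wildIndex-2, q)
--     else:
--         wildExpValue = 1
--     # store value of (26^(m-1)) mod q
--     expValue = modPow(26, len(p)-1, q)
--     pValue = 0 # stores f(p) mod q
--     iValue = 0 # stores f(x[i...(i+m-1)]) mod q
--     # initialize iValue to f(x[0...(m-1)]) mod q
--     # m iterations take place in the loop
--     # constant number of arithmetic operations on log(q) bit numbers take place in each iteration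
--     # O(m*log(q)) time
--     for j in range(len(p)):
--         if (j == wildIndex):
--             pValue = (pValue * (26 % q)) % q
--             iValue = (iValue * (26 % q)) % q
--         else:
--             pValue = (((26 % q) * pValue) % q + (((ord(p[j]) % q) - (65 % q)) % q)) % q
--             iValue = (((26 % q) * iValue) % q + (((ord(x[j]) % q) - (65 % q)) % q)) % q
--     if (iValue == pValue):
--         L.append(0)
--     i = 0
--     # (n-m) iterations take place in the loop
--     # constant number of arithmetic operations on log(q) bit numbers take place in each iteration
--     # O((n-m)*log(q)) time
--     for i in range(1, n-len(p)+1):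
--         iValue = (iValue - ((expValue*(((ord(x[i-1]) % q) - (65 % q)) % q)) % q)) % q # remove the most significant value from iValue
--         if (wildIndex == len(p)-1):
--             iValue = (iValue + (((ord(x[i+wildIndex-1]) % q) - (65 % q)) % q)) % q # add the value at old wildIndex
--         else:
--             iValue = (iValue - ((wildExpValue*(((ord(x[i+wildIndex]) % q) - (65 % q)) % q)) % q) + ((26 % q)*wildExpValue*(((ord(x[i+wildIndex-1]) % q) - (65 % q)) % q) % q)) % q
--         iValue = (iValue * (26 % q)) % q
--         if (wildIndex != len(p)-1):
--             iValue = (iValue + (((ord(x[i+len(p)-1]) % q) - (65 % q)) % q)) % q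
--         if (iValue == pValue):
--             L.append(i)
--     return L
-- ===== SOURCE B (Python) =====
-- def modPatternMatchWildcard(q, p, x):
--     # Same matches as the rolling-hash original, but each window hash is
--     # recomputed from scratch with one helper; no rolling update, no modPow.
--     wild = p.index('?')
--     def h(s):
--         acc = 0
--         for j, ch in enumerate(s):
--             if j == wild:
--                 acc = (acc * 26) % q
--             else:
--                 acc = (26 * acc + ord(ch) - 65) % q
--         return acc
--     pv = h(p)
--     return [i for i in range(len(x) - len(p) + 1) if h(x[i:i + len(p)]) == pv]
-- ===== Notes on version B (the rewrite author's own statement) =====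
-- stated objective: simpler
-- what changed: B drops A's rolling-hash update, its modPow powers and the quirky first-window/second-loop split: it hashes the pattern and every window from scratch with one shared helper and filters the matching start indices, at the cost of O(m) work per window instead of O(1).
-- outside the precondition, e.g. on modPatternMatchWildcard(7, 'A?', 'A'): A returns [0], B returns []; on modPatternMatchWildcard(7, 'A?', ''): A raises IndexError, B returns []
import Mathlib
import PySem

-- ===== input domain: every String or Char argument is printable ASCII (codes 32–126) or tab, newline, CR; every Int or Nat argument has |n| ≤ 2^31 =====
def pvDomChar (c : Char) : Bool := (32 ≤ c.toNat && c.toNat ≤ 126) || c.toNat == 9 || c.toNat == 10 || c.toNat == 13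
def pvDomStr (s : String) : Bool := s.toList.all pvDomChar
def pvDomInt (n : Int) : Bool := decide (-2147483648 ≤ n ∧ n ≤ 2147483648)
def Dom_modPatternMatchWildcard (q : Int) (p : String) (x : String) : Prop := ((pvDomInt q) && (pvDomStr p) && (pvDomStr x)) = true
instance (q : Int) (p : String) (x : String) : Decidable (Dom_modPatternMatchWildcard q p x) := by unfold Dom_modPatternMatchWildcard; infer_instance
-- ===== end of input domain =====

-- B replaces A's rolling-hash update (and its modPow powers) by recomputing each
-- window's hash from scratch with one shared helper: simpler, same matches (objective: simpler).

-- ===== PORT A =====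
-- helper modPow of the Python module (literal; Python diverges for b < 0 — never
-- called so — and the 'b ≤ 0' guard only makes the Lean recursion total there)
def modPow (a b c : Int) : Int :=
  if b ≤ 0 then 1
  else if PySem.Int.mod b 2 = 0 then
    PySem.Int.mod (modPow a (PySem.Int.floordiv b 2) c * modPow a (PySem.Int.floordiv b 2) c) c
  else
    PySem.Int.mod (PySem.Int.mod a c * modPow a (PySem.Int.floordiv b 2) c * modPow a (PySem.Int.floordiv b 2) c) c
termination_by b.toNat
decreasing_by
  all_goals
    (rename_i h _; rw [PySem.Int.floordiv_eq_ediv_of_pos (by omega : (0:Int) < 2)]; omega)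
  
-- t c is Python's (((ord(c) % q) - (65 % q)) % q), the per-character value both loops use
def pvT (q : Int) (c : Char) : Int :=
  PySem.Int.mod (PySem.Int.mod (c.toNat : Int) q - PySem.Int.mod 65 q) q

-- body of A's first loop (j runs over range(len(p)); two accumulators pValue, iValue)
def pvStep1 (q : Int) (wildIndex : Nat) (ps xs : List Char) (s : Int × Int) (j : Int) : Int × Int :=
  if j = (wildIndex : Int) then
    (PySem.Int.mod (s.1 * PySem.Int.mod 26 q) q, PySem.Int.mod (s.2 * PySem.Int.mod 26 q) q)
  else
    (PySem.Int.mod (PySem.Int.mod (PySem.Int.mod 26 q * s.1) q + pvT q (PySem.List.pyGetD ps j ' ')) q,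
     PySem.Int.mod (PySem.Int.mod (PySem.Int.mod 26 q * s.2) q + pvT q (PySem.List.pyGetD xs j ' ')) q)

-- body of A's second loop (i runs over range(1, n-len(p)+1); state (iValue, L))
def pvStep2 (q : Int) (wildIndex m : Nat) (xs : List Char)
    (wildExpValue expValue pValue : Int) (s : Int × List Int) (i : Int) : Int × List Int :=
  let iv1 := PySem.Int.mod (s.1 - PySem.Int.mod (expValue * pvT q (PySem.List.pyGetD xs (i - 1) ' ')) q) q
  let iv2 :=
    if wildIndex = m - 1 then
      PySem.Int.mod (iv1 + pvT q (PySem.List.pyGetD xs (i + (wildIndex : Int) - 1) ' ')) q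
    else
      PySem.Int.mod (iv1 - PySem.Int.mod (wildExpValue * pvT q (PySem.List.pyGetD xs (i + (wildIndex : Int)) ' ')) q
        + PySem.Int.mod (PySem.Int.mod 26 q * wildExpValue * pvT q (PySem.List.pyGetD xs (i + (wildIndex : Int) - 1) ' ')) q) q
  let iv3 := PySem.Int.mod (iv2 * PySem.Int.mod 26 q) q
  let iv4 := if wildIndex ≠ m - 1 then PySem.Int.mod (iv3 + pvT q (PySem.List.pyGetD xs (i + (m : Int) - 1) ' ')) q else iv3
  (iv4, if iv4 = pValue then s.2 ++ [i] else s.2)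

def modPatternMatchWildcard (q : Int) (p : String) (x : String) : List Int :=
  let ps := p.toList
  let xs := x.toList
  let n : Int := PySem.List.len xs
  match PySem.List.index? ps '?' with
  | none => []   -- p.index('?') raises ValueError here: excluded by Pre_
  | some wildIndex =>
    let m := ps.length
    let wildExpValue : Int :=
      if wildIndex ≠ m - 1 then modPow 26 ((m : Int) - (wildIndex : Int) - 2) q else 1
    let expValue : Int := modPow 26 ((m : Int) - 1) q
    let pi := (PySem.List.pyRange 0 (m : Int) 1).foldl (pvStep1 q wildIndex ps xs) (0, 0)
    let pValue := pi.1
    let L0 : List Int := if pi.2 = pValue then [0] else []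
    ((PySem.List.pyRange 1 (n - (m : Int) + 1) 1).foldl
        (pvStep2 q wildIndex m xs wildExpValue expValue pValue) (pi.2, L0)).2

-- ===== PORT B =====
-- Source B's helper h(s): one from-scratch hash pass over a string, skipping position wild
def pvHash (q : Int) (wild : Nat) (s : List Char) : Int :=
  (PySem.List.enumerate s 0).foldl
    (fun acc jc => if jc.1 = (wild : Int) then PySem.Int.mod (acc * 26) q
                   else PySem.Int.mod (26 * acc + (jc.2.toNat : Int) - 65) q) 0

def modPatternMatchWildcard_alt (q : Int) (p : String) (x : String) : List Int :=
  match PySem.List.index? p.toList '?' with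
  | none => []   -- p.index('?') raises ValueError here: excluded by Pre_
  | some wild =>
    let xs := x.toList
    let pv := pvHash q wild p.toList
    (PySem.List.pyRange 0 (PySem.List.len xs - PySem.List.len p.toList + 1) 1).filter
      (fun i => decide (pvHash q wild (PySem.List.slice xs (some i) (some (i + (p.toList.length : Int)))) = pv))

-- ===== PRECONDITION & SPEC =====
-- Pre_ excludes q = 0 (ZeroDivisionError) and patterns without '?' (ValueError), and
-- patterns longer than the text, where A raises IndexError except on the accidental
-- sliver len(p) = len(x)+1 with the '?' last, where A's first window is evaluated
-- without reading past x and may report a match at 0 although no length-len(p)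
-- window exists (an artefact of A's joint first loop).
def Pre_modPatternMatchWildcard (q : Int) (p : String) (x : String) : Prop :=
  q ≠ 0 ∧ '?' ∈ p.toList ∧ p.toList.length ≤ x.toList.length
instance (q : Int) (p : String) (x : String) : Decidable (Pre_modPatternMatchWildcard q p x) := by
  unfold Pre_modPatternMatchWildcard; infer_instance

def pvWitness_modPatternMatchWildcard : Int × String × String := (26, "A?C", "ABCAXC")

def Spec_modPatternMatchWildcard (q : Int) (p : String) (x : String) (out : List Int) : Prop := out = modPatternMatchWildcard_alt q p x
instance (q : Int) (p : String) (x : String) (out : List Int) : Decidable (Spec_modPatternMatchWildcard q p x out) := by unfold Spec_modPatternMatchWildcard; infer_instance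

-- ===== CLAIM (what is proved, stated in full; the proofs are below) =====
def Claim_equal_modPatternMatchWildcard : Prop := ∀ (q : Int) (p : String) (x : String), Dom_modPatternMatchWildcard q p x → Pre_modPatternMatchWildcard q p x → Spec_modPatternMatchWildcard q p x (modPatternMatchWildcard q p x)

-- ===== LEMMAS AND PROOFS =====

-- Python's % is Int.fmod (definitional in PySem)
theorem pv_pymod (a b : Int) : PySem.Int.mod a b = Int.fmod a b := rfl

theorem pv_emod_fmod (a b : Int) : (Int.fmod a b) % b = a % b := by
  rw [Int.fmod_eq_emod]; split_ifs <;> simp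

theorem pv_fmodeq (a b : Int) : Int.ModEq b (Int.fmod a b) a := pv_emod_fmod a b

theorem pv_fmod_congr {b a a' : Int} (h : Int.ModEq b a a') : Int.fmod a b = Int.fmod a' b := by
  rw [Int.fmod_eq_emod, Int.fmod_eq_emod, (h : a % b = a' % b)]
  have hd : (b ∣ a) ↔ (b ∣ a') := by
    constructor <;> intro hdv
    · exact Int.dvd_of_emod_eq_zero (by rw [← (h : a % b = a' % b)]; exact Int.emod_eq_zero_of_dvd hdv)
    · exact Int.dvd_of_emod_eq_zero (by rw [(h : a % b = a' % b)]; exact Int.emod_eq_zero_of_dvd hdv)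
  simp [hd]

-- raw (un-modded) per-character value ord(c) - 65
def pvVal (c : Char) : Int := (c.toNat : Int) - 65

-- raw polynomial hash of cs, positions counted from t, skipping absolute position wi
def pvRawSum (wi : Nat) (t : Int) (cs : List Char) : Int :=
  ∑ j ∈ Finset.range cs.length,
    if t + (j : Int) = (wi : Int) then 0 else pvVal (cs.getD j ' ') * 26 ^ (cs.length - 1 - j)

theorem pvRawSum_nil (wi : Nat) (t : Int) : pvRawSum wi t [] = 0 := by simp [pvRawSum]

theorem pvRawSum_cons (wi : Nat) (t : Int) (c : Char) (cs : List Char) :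
    pvRawSum wi t (c :: cs)
      = (if t = (wi : Int) then 0 else pvVal c * 26 ^ cs.length) + pvRawSum wi (t + 1) cs := by
  unfold pvRawSum
  rw [List.length_cons, Finset.sum_range_succ']
  have h0 : (if t + ((0 : Nat) : Int) = (wi : Int) then 0
      else pvVal ((c :: cs).getD 0 ' ') * 26 ^ (cs.length + 1 - 1 - 0))
      = (if t = (wi : Int) then 0 else pvVal c * 26 ^ cs.length) := by
    simp
  rw [h0, add_comm]
  congr 1
  apply Finset.sum_congr rfl
  intro j hj
  have hexp : cs.length + 1 - 1 - (j + 1) = cs.length - 1 - j := by omega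
  have hcond : (t + ((j + 1 : Nat) : Int) = (wi : Int)) ↔ (t + 1 + (j : Int) = (wi : Int)) := by
    push_cast; constructor <;> intro h <;> linarith
  rw [List.getD_cons_succ, hexp]
  by_cases h : t + 1 + (j : Int) = (wi : Int)
  · rw [if_pos (hcond.mpr h), if_pos h]
  · rw [if_neg (fun hh => h (hcond.mp hh)), if_neg h]

-- the one hash-loop shape both programs use, characterised as a raw sum mod q
theorem pvHash_core (q : Int) (wi : Nat) (cs : List Char) : ∀ (t a : Int), Int.fmod a q = a →
    (PySem.List.enumerate cs t).foldl
      (fun acc jc => if jc.1 = (wi : Int) then Int.fmod (acc * 26) q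
                     else Int.fmod (26 * acc + pvVal jc.2) q) a
      = Int.fmod (a * 26 ^ cs.length + pvRawSum wi t cs) q := by
  induction cs with
  | nil => intro t a ha; simp [PySem.List.enumerate_nil, pvRawSum_nil, ha]
  | cons c cs ih =>
    intro t a ha
    simp only [PySem.List.enumerate_cons, List.foldl_cons]
    rw [show (if t = (wi : Int) then Int.fmod (a * 26) q else Int.fmod (26 * a + pvVal c) q)
        = Int.fmod (if t = (wi : Int) then a * 26 else 26 * a + pvVal c) q from by split <;> rfl]
    rw [ih (t + 1) _ (Int.fmod_fmod _ _)]
    apply pv_fmod_congr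
    rw [pvRawSum_cons, List.length_cons]
    have hS : Int.ModEq q (Int.fmod (if t = (wi : Int) then a * 26 else 26 * a + pvVal c) q)
        ((if t = (wi : Int) then a * 26 else 26 * a + pvVal c)) := pv_fmodeq _ _
    have h2 := Int.ModEq.add (Int.ModEq.mul hS (Int.ModEq.refl ((26:Int) ^ cs.length)))
        (Int.ModEq.refl (pvRawSum wi (t + 1) cs))
    refine h2.trans (Int.ModEq.refl _ |>.trans ?_)
    have : (if t = (wi : Int) then a * 26 else 26 * a + pvVal c) * 26 ^ cs.length
          + pvRawSum wi (t + 1) cs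
        = a * 26 ^ (cs.length + 1)
          + ((if t = (wi : Int) then 0 else pvVal c * 26 ^ cs.length) + pvRawSum wi (t + 1) cs) := by
      split_ifs <;> ring
    rw [this]

-- A's helper modPow computes a^n mod c (as a congruence)
theorem pv_modPow_modeq (a c : Int) : ∀ n : Nat, Int.ModEq c (modPow a (n : Int) c) (a ^ n) := by
  intro n
  induction n using Nat.strong_induction_on with
  | _ n ih =>
    match n with
    | 0 => rw [modPow]; simp
    | Nat.succ k =>
      have hpos : ¬ ((Nat.succ k : Int) ≤ 0) := by omega
      have hfd : PySem.Int.floordiv ((Nat.succ k : Nat) : Int) 2 = (((Nat.succ k) / 2 : Nat) : Int) :=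
        PySem.Int.floordiv_natCast _ 2
      have hmd : PySem.Int.mod ((Nat.succ k : Nat) : Int) 2 = (((Nat.succ k) % 2 : Nat) : Int) :=
        PySem.Int.mod_natCast _ 2
      have ihh := ih ((Nat.succ k) / 2) (by omega)
      rw [modPow]
      simp only [hpos, if_false, hfd, hmd]
      by_cases he : (Nat.succ k) % 2 = 0
      · have hcond : ((((Nat.succ k) % 2 : Nat) : Int) = 0) := by exact_mod_cast he
        simp only [hcond, pv_pymod]
        have : Int.ModEq c (Int.fmod (modPow a (((Nat.succ k) / 2 : Nat) : Int) c
              * modPow a (((Nat.succ k) / 2 : Nat) : Int) c) c)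
            (a ^ ((Nat.succ k) / 2) * a ^ ((Nat.succ k) / 2)) :=
          (pv_fmodeq _ _).trans (Int.ModEq.mul ihh ihh)
        refine this.trans ?_
        rw [← pow_add]
        have : (Nat.succ k) / 2 + (Nat.succ k) / 2 = Nat.succ k := by omega
        rw [this]
      · have hcond : ¬ ((((Nat.succ k) % 2 : Nat) : Int) = 0) := by exact_mod_cast he
        simp only [hcond, if_false, pv_pymod]
        have : Int.ModEq c (Int.fmod (Int.fmod a c * modPow a (((Nat.succ k) / 2 : Nat) : Int) c
              * modPow a (((Nat.succ k) / 2 : Nat) : Int) c) c)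
            (a * a ^ ((Nat.succ k) / 2) * a ^ ((Nat.succ k) / 2)) :=
          (pv_fmodeq _ _).trans (Int.ModEq.mul (Int.ModEq.mul (pv_fmodeq a c) ihh) ihh)
        refine this.trans ?_
        rw [mul_assoc, ← pow_add, ← pow_succ']
        have : ((Nat.succ k) / 2 + (Nat.succ k) / 2) + 1 = Nat.succ k := by omega
        rw [this]


-- fmod absorption (rewriting inner fmod's away inside an outer fmod)
theorem pvF_addl (q a b : Int) : Int.fmod (Int.fmod a q + b) q = Int.fmod (a + b) q :=
  pv_fmod_congr (Int.ModEq.add (pv_fmodeq a q) (Int.ModEq.refl b))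
theorem pvF_addr (q a b : Int) : Int.fmod (a + Int.fmod b q) q = Int.fmod (a + b) q :=
  pv_fmod_congr (Int.ModEq.add (Int.ModEq.refl a) (pv_fmodeq b q))
theorem pvF_subl (q a b : Int) : Int.fmod (Int.fmod a q - b) q = Int.fmod (a - b) q :=
  pv_fmod_congr (Int.ModEq.sub (pv_fmodeq a q) (Int.ModEq.refl b))
theorem pvF_subr (q a b : Int) : Int.fmod (a - Int.fmod b q) q = Int.fmod (a - b) q :=
  pv_fmod_congr (Int.ModEq.sub (Int.ModEq.refl a) (pv_fmodeq b q))
theorem pvF_mull (q a b : Int) : Int.fmod (Int.fmod a q * b) q = Int.fmod (a * b) q :=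
  pv_fmod_congr (Int.ModEq.mul (pv_fmodeq a q) (Int.ModEq.refl b))
theorem pvF_mulr (q a b : Int) : Int.fmod (a * Int.fmod b q) q = Int.fmod (a * b) q :=
  pv_fmod_congr (Int.ModEq.mul (Int.ModEq.refl a) (pv_fmodeq b q))

theorem pvT_eq (q : Int) (c : Char) : pvT q c = Int.fmod (pvVal c) q := by
  unfold pvT pvVal
  simp only [pv_pymod]
  rw [pvF_subl, pvF_subr]

-- the full raw window sum (no wildcard skip) and the skipped one
def pvFull (xs : List Char) (m i : Nat) : Int :=
  ∑ j ∈ Finset.range m, pvVal (xs.getD (i + j) ' ') * 26 ^ (m - 1 - j)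
def pvWin (xs : List Char) (m wi i : Nat) : Int :=
  ∑ j ∈ Finset.range m, if j = wi then 0 else pvVal (xs.getD (i + j) ' ') * 26 ^ (m - 1 - j)

theorem pvWin_eq (xs : List Char) (m wi i : Nat) (hwi : wi < m) :
    pvWin xs m wi i = pvFull xs m i - pvVal (xs.getD (i + wi) ' ') * 26 ^ (m - 1 - wi) := by
  unfold pvWin pvFull
  have h : ∀ j ∈ Finset.range m,
      (if j = wi then 0 else pvVal (xs.getD (i + j) ' ') * 26 ^ (m - 1 - j))
      = pvVal (xs.getD (i + j) ' ') * 26 ^ (m - 1 - j)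
        - (if j = wi then pvVal (xs.getD (i + j) ' ') * 26 ^ (m - 1 - j) else 0) := by
    intro j _; split <;> ring
  rw [Finset.sum_congr rfl h, Finset.sum_sub_distrib]
  congr 1
  rw [Finset.sum_ite_eq' (Finset.range m) wi
    (fun j => pvVal (xs.getD (i + j) ' ') * 26 ^ (m - 1 - j))]
  simp [Finset.mem_range.mpr hwi]

theorem pvFull_succ (xs : List Char) (M i : Nat) :
    pvFull xs (M + 1) (i + 1)
      = 26 * (pvFull xs (M + 1) i - pvVal (xs.getD i ' ') * 26 ^ M)
        + pvVal (xs.getD (i + 1 + M) ' ') := by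
  have hA : pvFull xs (M + 1) i
      = (∑ j ∈ Finset.range M, pvVal (xs.getD (i + 1 + j) ' ') * 26 ^ (M - 1 - j))
        + pvVal (xs.getD i ' ') * 26 ^ M := by
    unfold pvFull
    rw [Finset.sum_range_succ']
    have hterm : ∀ j ∈ Finset.range M,
        pvVal (xs.getD (i + (j + 1)) ' ') * 26 ^ (M + 1 - 1 - (j + 1))
        = pvVal (xs.getD (i + 1 + j) ' ') * 26 ^ (M - 1 - j) := by
      intro j hj
      have h1 : i + (j + 1) = i + 1 + j := by omega
      have h2 : M + 1 - 1 - (j + 1) = M - 1 - j := by omega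
      rw [h1, h2]
    rw [Finset.sum_congr rfl hterm]
    simp
  have hB : pvFull xs (M + 1) (i + 1)
      = (∑ j ∈ Finset.range M, pvVal (xs.getD (i + 1 + j) ' ') * 26 ^ (M - j))
        + pvVal (xs.getD (i + 1 + M) ' ') := by
    unfold pvFull
    rw [Finset.sum_range_succ]
    have hterm : ∀ j ∈ Finset.range M,
        pvVal (xs.getD (i + 1 + j) ' ') * 26 ^ (M + 1 - 1 - j)
        = pvVal (xs.getD (i + 1 + j) ' ') * 26 ^ (M - j) := by
      intro j hj
      have h2 : M + 1 - 1 - j = M - j := by omega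
      rw [h2]
    rw [Finset.sum_congr rfl hterm]
    have h3 : M + 1 - 1 - M = 0 := by omega
    rw [h3, pow_zero, mul_one]
  have hC : (∑ j ∈ Finset.range M, pvVal (xs.getD (i + 1 + j) ' ') * 26 ^ (M - j))
      = 26 * ∑ j ∈ Finset.range M, pvVal (xs.getD (i + 1 + j) ' ') * 26 ^ (M - 1 - j) := by
    rw [Finset.mul_sum]
    apply Finset.sum_congr rfl
    intro j hj
    have hj' : j < M := Finset.mem_range.mp hj
    have h4 : M - j = (M - 1 - j) + 1 := by omega
    rw [h4, pow_succ]
    ring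
  rw [hB, hC, hA]; ring

-- rolling identity, wildcard at the last position (wi = m-1, m = M+1)
theorem pvRoll_last (xs : List Char) (M i : Nat) :
    pvWin xs (M + 1) M (i + 1)
      = 26 * (pvWin xs (M + 1) M i - pvVal (xs.getD i ' ') * 26 ^ M + pvVal (xs.getD (i + M) ' ')) := by
  rw [pvWin_eq xs (M + 1) M (i + 1) (by omega), pvWin_eq xs (M + 1) M i (by omega), pvFull_succ]
  have e1 : M + 1 - 1 - M = 0 := by omega
  rw [e1, pow_zero]
  ring

-- rolling identity, wildcard strictly inside (wi + 2 ≤ m)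
theorem pvRoll_mid (xs : List Char) (m wi i : Nat) (hwi : wi + 2 ≤ m) :
    pvWin xs m wi (i + 1)
      = 26 * (pvWin xs m wi i - pvVal (xs.getD i ' ') * 26 ^ (m - 1)
          - pvVal (xs.getD (i + 1 + wi) ' ') * 26 ^ (m - 2 - wi)
          + pvVal (xs.getD (i + wi) ' ') * 26 ^ (m - 1 - wi))
        + pvVal (xs.getD (i + m) ' ') := by
  obtain ⟨M, rfl⟩ : ∃ M, m = M + 1 := ⟨m - 1, by omega⟩
  rw [pvWin_eq xs (M + 1) wi (i + 1) (by omega), pvWin_eq xs (M + 1) wi i (by omega), pvFull_succ]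
  have e0 : i + (M + 1) = i + 1 + M := by omega
  have e1 : M + 1 - 1 = M := by omega
  have e2 : M + 1 - 1 - wi = (M + 1 - 2 - wi) + 1 := by omega
  rw [e0, e2, e1, pow_succ]
  ring


-- B's helper h(s) is the raw hash mod q
theorem pvHash_eq (q : Int) (wi : Nat) (cs : List Char) :
    pvHash q wi cs = Int.fmod (pvRawSum wi 0 cs) q := by
  unfold pvHash
  have hfun : (fun (acc : Int) (jc : Int × Char) =>
        if jc.1 = (wi : Int) then PySem.Int.mod (acc * 26) q
        else PySem.Int.mod (26 * acc + (jc.2.toNat : Int) - 65) q)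
      = (fun acc jc => if jc.1 = (wi : Int) then Int.fmod (acc * 26) q
        else Int.fmod (26 * acc + pvVal jc.2) q) := by
    funext acc jc
    by_cases h : jc.1 = (wi : Int)
    · simp [h, pv_pymod]
    · simp only [h, if_false, pv_pymod]
      rw [show 26 * acc + (jc.2.toNat : Int) - 65 = 26 * acc + pvVal jc.2 from by unfold pvVal; ring]
  rw [hfun, pvHash_core q wi cs 0 0 (Int.zero_fmod q)]
  simp

-- the same loop written over range(len(cs)) with explicit indexing
theorem pvRangeFold (q : Int) (wi : Nat) (cs : List Char) :
    (PySem.List.pyRange 0 (cs.length : Int) 1).foldl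
      (fun a j => if j = (wi : Int) then Int.fmod (a * 26) q
        else Int.fmod (26 * a + pvVal (PySem.List.pyGetD cs j ' ')) q) 0
    = Int.fmod (pvRawSum wi 0 cs) q := by
  have hcore := pvHash_core q wi cs 0 0 (Int.zero_fmod q)
  rw [PySem.List.enumerate_eq_map_pyRange (xs := cs) (d := ' '), List.foldl_map] at hcore
  simp only [PySem.List.len_eq] at hcore
  simpa using hcore

-- a raw sum over a window list is the window sum over xs
theorem pvRawSum_eq_win (wi : Nat) (cs xs : List Char) (m k : Nat)
    (hlen : cs.length = m) (hget : ∀ j < m, cs.getD j ' ' = xs.getD (k + j) ' ') :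
    pvRawSum wi 0 cs = pvWin xs m wi k := by
  unfold pvRawSum pvWin
  rw [hlen]
  apply Finset.sum_congr rfl
  intro j hj
  have hj' : j < m := Finset.mem_range.mp hj
  have hcond : ((0 : Int) + (j : Int) = (wi : Int)) ↔ (j = wi) := by omega
  rw [hget j hj']
  by_cases h : j = wi
  · rw [if_pos (hcond.mpr h), if_pos h]
  · rw [if_neg (fun hh => h (hcond.mp hh)), if_neg h]

theorem pv_getD_take (xs : List Char) (m j : Nat) (hj : j < m) :
    (xs.take m).getD j ' ' = xs.getD j ' ' := by
  simp [List.getD]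
  rw [List.getElem?_take]
  simp [hj]

theorem pv_getD_drop_take (xs : List Char) (k m j : Nat) (hj : j < m) :
    ((xs.drop k).take m).getD j ' ' = xs.getD (k + j) ' ' := by
  simp [List.getD]
  rw [List.getElem?_take, List.getElem?_drop]
  simp [hj]

-- B's hash of the window x[k:k+m] is the window sum mod q
theorem pvWindowHash (q : Int) (wi : Nat) (xs : List Char) (m k : Nat) (hk : k + m ≤ xs.length) :
    pvHash q wi (PySem.List.slice xs (some (k : Int)) (some ((k : Int) + (m : Int))))
      = Int.fmod (pvWin xs m wi k) q := by
  rw [PySem.List.slice_natCast_add, pvHash_eq]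
  congr 1
  apply pvRawSum_eq_win wi _ xs m k
  · rw [List.length_take, List.length_drop]; omega
  · intro j hj; exact pv_getD_drop_take xs k m j hj

-- A's joint first loop: pValue and the initial iValue
theorem pvFold1 (q : Int) (wi : Nat) (ps xs : List Char) (hmn : ps.length ≤ xs.length) :
    (PySem.List.pyRange 0 (ps.length : Int) 1).foldl (pvStep1 q wi ps xs) (0, 0)
      = (Int.fmod (pvRawSum wi 0 ps) q, Int.fmod (pvRawSum wi 0 (xs.take ps.length)) q) := by
  have hsplit : pvStep1 q wi ps xs = (fun (s : Int × Int) (j : Int) =>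
      ((fun (a : Int) (j : Int) => if j = (wi : Int) then PySem.Int.mod (a * PySem.Int.mod 26 q) q
          else PySem.Int.mod (PySem.Int.mod (PySem.Int.mod 26 q * a) q + pvT q (PySem.List.pyGetD ps j ' ')) q) s.1 j,
       (fun (a : Int) (j : Int) => if j = (wi : Int) then PySem.Int.mod (a * PySem.Int.mod 26 q) q
          else PySem.Int.mod (PySem.Int.mod (PySem.Int.mod 26 q * a) q + pvT q (PySem.List.pyGetD xs j ' ')) q) s.2 j)) := by
    funext s j
    unfold pvStep1
    by_cases h : j = (wi : Int) <;> simp [h]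
  rw [hsplit, PySem.List.foldl_prod_mk
    (f := fun (a : Int) (j : Int) => if j = (wi : Int) then PySem.Int.mod (a * PySem.Int.mod 26 q) q
      else PySem.Int.mod (PySem.Int.mod (PySem.Int.mod 26 q * a) q + pvT q (PySem.List.pyGetD ps j ' ')) q)
    (g := fun (a : Int) (j : Int) => if j = (wi : Int) then PySem.Int.mod (a * PySem.Int.mod 26 q) q
      else PySem.Int.mod (PySem.Int.mod (PySem.Int.mod 26 q * a) q + pvT q (PySem.List.pyGetD xs j ' ')) q)]
  have hnorm : ∀ (cs : List Char),
      (fun (a : Int) (j : Int) => if j = (wi : Int) then PySem.Int.mod (a * PySem.Int.mod 26 q) q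
          else PySem.Int.mod (PySem.Int.mod (PySem.Int.mod 26 q * a) q + pvT q (PySem.List.pyGetD cs j ' ')) q)
      = (fun (a : Int) (j : Int) => if j = (wi : Int) then Int.fmod (a * 26) q
          else Int.fmod (26 * a + pvVal (PySem.List.pyGetD cs j ' ')) q) := by
    intro cs
    funext a j
    by_cases h : j = (wi : Int)
    · subst h; simp [pv_pymod, pvF_mulr]
    · simp only [h, if_false, pv_pymod, pvT_eq]
      rw [pvF_mull, pvF_addl, pvF_addr]
  rw [Prod.mk.injEq]
  constructor
  · rw [hnorm ps]
    exact pvRangeFold q wi ps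
  · have htake : (xs.take ps.length).length = ps.length := by
      rw [List.length_take]; omega
    have hxlen : (ps.length : Int) ≤ (xs.length : Int) := by exact_mod_cast hmn
    have hc : ∀ (acc : Int) (j : Int), j ∈ PySem.List.pyRange 0 (ps.length : Int) 1 →
        (fun (a : Int) (j : Int) => if j = (wi : Int) then PySem.Int.mod (a * PySem.Int.mod 26 q) q
          else PySem.Int.mod (PySem.Int.mod (PySem.Int.mod 26 q * a) q + pvT q (PySem.List.pyGetD xs j ' ')) q) acc j
        = (fun (a : Int) (j : Int) => if j = (wi : Int) then PySem.Int.mod (a * PySem.Int.mod 26 q) q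
          else PySem.Int.mod (PySem.Int.mod (PySem.Int.mod 26 q * a) q + pvT q (PySem.List.pyGetD (xs.take ps.length) j ' ')) q) acc j := by
      intro acc j hjmem
      have hb := (PySem.List.mem_pyRange_one).mp hjmem
      have hget : PySem.List.pyGetD xs j ' ' = PySem.List.pyGetD (xs.take ps.length) j ' ' := by
        rw [PySem.List.pyGetD_eq_getElem xs ' ' hb.1 (by omega),
            PySem.List.pyGetD_eq_getElem (xs.take ps.length) ' ' hb.1 (by rw [htake]; omega)]
        rw [List.getElem_take]
      simp only [hget]
    rw [PySem.List.foldl_congr_mem _ _ _ _ hc]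
    have hb2 : (ps.length : Int) = ((xs.take ps.length).length : Int) := by rw [htake]
    rw [hb2, hnorm (xs.take ps.length)]
    exact pvRangeFold q wi (xs.take ps.length)


theorem pvStep2_pair (q : Int) (wi m : Nat) (xs : List Char) (E V pV u : Int) (L : List Int) (i : Int) :
    pvStep2 q wi m xs E V pV (u, L) i
      = ((pvStep2 q wi m xs E V pV (u, L) i).1,
         if (pvStep2 q wi m xs E V pV (u, L) i).1 = pV then L ++ [i] else L) := rfl

-- one iteration of A's second loop advances the window-sum invariant
theorem pvStep2_eq (q : Int) (wi m : Nat) (xs : List Char) (pV : Int) (L : List Int)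
    (hwi : wi < m) (k : Nat) :
    pvStep2 q wi m xs (if wi ≠ m - 1 then modPow 26 ((m : Int) - (wi : Int) - 2) q else 1)
        (modPow 26 ((m : Int) - 1) q) pV
        (Int.fmod (pvWin xs m wi k) q, L) ((k + 1 : Nat) : Int)
    = (Int.fmod (pvWin xs m wi (k + 1)) q,
       if Int.fmod (pvWin xs m wi (k + 1)) q = pV then L ++ [((k + 1 : Nat) : Int)] else L) := by
  obtain ⟨M, rfl⟩ : ∃ M, m = M + 1 := ⟨m - 1, by omega⟩
  rw [pvStep2_pair]
  have hfst : (pvStep2 q wi (M + 1) xs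
      (if wi ≠ (M + 1) - 1 then modPow 26 (((M + 1 : Nat) : Int) - (wi : Int) - 2) q else 1)
      (modPow 26 (((M + 1 : Nat) : Int) - 1) q) pV
      (Int.fmod (pvWin xs (M + 1) wi k) q, L) ((k + 1 : Nat) : Int)).1
      = Int.fmod (pvWin xs (M + 1) wi (k + 1)) q := by
    unfold pvStep2
    have hM1 : (M + 1) - 1 = M := by omega
    have hEe : ((M + 1 : Nat) : Int) - 1 = ((M : Nat) : Int) := by push_cast; ring
    have i1 : ((k + 1 : Nat) : Int) - 1 = ((k : Nat) : Int) := by push_cast; ring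
    simp only [hM1, hEe]
    by_cases hlast : wi = M
    · subst hlast
      simp only [ne_eq, not_true_eq_false, if_true, if_false]
      have i2 : ((k + 1 : Nat) : Int) + (wi : Int) - 1 = ((k + wi : Nat) : Int) := by push_cast; ring
      rw [i1, i2]
      simp only [PySem.List.pyGetD_natCast, pvT_eq]
      simp only [pv_pymod]
      apply pv_fmod_congr
      have h2 : Int.ModEq q
          ((((pvWin xs (wi + 1) wi k).fmod q
              - (modPow 26 ((wi : Nat) : Int) q * (pvVal (xs.getD k ' ')).fmod q).fmod q).fmod q
            + (pvVal (xs.getD (k + wi) ' ')).fmod q).fmod q)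
          (pvWin xs (wi + 1) wi k - 26 ^ wi * pvVal (xs.getD k ' ') + pvVal (xs.getD (k + wi) ' ')) :=
        (pv_fmodeq _ _).trans (Int.ModEq.add
          ((pv_fmodeq _ _).trans (Int.ModEq.sub (pv_fmodeq _ _)
            ((pv_fmodeq _ _).trans (Int.ModEq.mul (pv_modPow_modeq 26 q wi) (pv_fmodeq _ _)))))
          (pv_fmodeq _ _))
      have hfin : (pvWin xs (wi + 1) wi k - 26 ^ wi * pvVal (xs.getD k ' ')
          + pvVal (xs.getD (k + wi) ' ')) * 26 = pvWin xs (wi + 1) wi (k + 1) := by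
        rw [pvRoll_last xs wi k]; ring
      exact (Int.ModEq.mul h2 (pv_fmodeq 26 q)).trans (hfin ▸ Int.ModEq.refl _)
    · have hne : ¬ (wi = M) := hlast
      simp only [ne_eq, hne, not_false_eq_true, if_true, if_false]
      have i2 : ((k + 1 : Nat) : Int) + (wi : Int) - 1 = ((k + wi : Nat) : Int) := by push_cast; ring
      have i3 : ((k + 1 : Nat) : Int) + (wi : Int) = ((k + 1 + wi : Nat) : Int) := by push_cast; ring
      have i4 : ((k + 1 : Nat) : Int) + ((M + 1 : Nat) : Int) - 1 = ((k + (M + 1) : Nat) : Int) := by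
        push_cast; ring
      have hE2 : ((M + 1 : Nat) : Int) - (wi : Int) - 2 = ((M - 1 - wi : Nat) : Int) := by
        have : wi ≤ M - 1 := by omega
        push_cast; omega
      rw [i1, i2, i3, i4, hE2]
      simp only [PySem.List.pyGetD_natCast, pvT_eq, pv_pymod]
      apply pv_fmod_congr
      have h1 : Int.ModEq q
          (((pvWin xs (M + 1) wi k).fmod q
            - (modPow 26 ((M : Nat) : Int) q * (pvVal (xs.getD k ' ')).fmod q).fmod q).fmod q)
          (pvWin xs (M + 1) wi k - 26 ^ M * pvVal (xs.getD k ' ')) :=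
        (pv_fmodeq _ _).trans (Int.ModEq.sub (pv_fmodeq _ _)
          ((pv_fmodeq _ _).trans (Int.ModEq.mul (pv_modPow_modeq 26 q M) (pv_fmodeq _ _))))
      have h2 : Int.ModEq q
          ((((pvWin xs (M + 1) wi k).fmod q
              - (modPow 26 ((M : Nat) : Int) q * (pvVal (xs.getD k ' ')).fmod q).fmod q).fmod q
            - (modPow 26 ((M - 1 - wi : Nat) : Int) q * (pvVal (xs.getD (k + 1 + wi) ' ')).fmod q).fmod q
            + (Int.fmod 26 q * modPow 26 ((M - 1 - wi : Nat) : Int) q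
                * (pvVal (xs.getD (k + wi) ' ')).fmod q).fmod q).fmod q)
          (pvWin xs (M + 1) wi k - 26 ^ M * pvVal (xs.getD k ' ')
            - 26 ^ (M - 1 - wi) * pvVal (xs.getD (k + 1 + wi) ' ')
            + 26 * 26 ^ (M - 1 - wi) * pvVal (xs.getD (k + wi) ' ')) :=
        (pv_fmodeq _ _).trans (Int.ModEq.add
          (Int.ModEq.sub h1
            ((pv_fmodeq _ _).trans (Int.ModEq.mul (pv_modPow_modeq 26 q (M - 1 - wi)) (pv_fmodeq _ _))))
          ((pv_fmodeq _ _).trans (Int.ModEq.mul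
            (Int.ModEq.mul (pv_fmodeq 26 q) (pv_modPow_modeq 26 q (M - 1 - wi))) (pv_fmodeq _ _))))
      have hfin : (pvWin xs (M + 1) wi k - 26 ^ M * pvVal (xs.getD k ' ')
            - 26 ^ (M - 1 - wi) * pvVal (xs.getD (k + 1 + wi) ' ')
            + 26 * 26 ^ (M - 1 - wi) * pvVal (xs.getD (k + wi) ' ')) * 26
            + pvVal (xs.getD (k + (M + 1)) ' ')
          = pvWin xs (M + 1) wi (k + 1) := by
        rw [pvRoll_mid xs (M + 1) wi k (by omega)]
        simp only [show M + 1 - 1 = M from by omega, show M + 1 - 2 = M - 1 from by omega]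
        rw [show (26 : Int) ^ (M - wi) = 26 ^ (M - 1 - wi) * 26 from by rw [← pow_succ]; congr 1; omega]
        ring
      exact (Int.ModEq.add ((pv_fmodeq _ _).trans (Int.ModEq.mul h2 (pv_fmodeq 26 q)))
        (pv_fmodeq _ _)).trans (hfin ▸ Int.ModEq.refl _)
  rw [hfst]


-- indices 1..K that match, in order (the list A appends / B filters)
def pvCands (f : Nat → Bool) : Nat → List Int
  | 0 => []
  | K + 1 => pvCands f K ++ (if f (K + 1) then [((K + 1 : Nat) : Int)] else [])

theorem pvLoop2 (q : Int) (wi m : Nat) (xs : List Char) (pV : Int) (hwi : wi < m) :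
    ∀ (K : Nat) (L : List Int),
    (PySem.List.pyRange 1 ((K : Int) + 1) 1).foldl
        (pvStep2 q wi m xs (if wi ≠ m - 1 then modPow 26 ((m : Int) - (wi : Int) - 2) q else 1)
          (modPow 26 ((m : Int) - 1) q) pV)
        (Int.fmod (pvWin xs m wi 0) q, L)
      = (Int.fmod (pvWin xs m wi K) q,
         L ++ pvCands (fun k => decide (Int.fmod (pvWin xs m wi k) q = pV)) K) := by
  intro K
  induction K with
  | zero =>
    intro L
    rw [show ((0 : Nat) : Int) + 1 = (1 : Int) from by norm_num,
      PySem.List.pyRange_one_eq_nil (le_refl 1)]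
    simp [pvCands]
  | succ K ih =>
    intro L
    rw [show ((K + 1 : Nat) : Int) + 1 = (((K : Nat) : Int) + 1) + 1 from by push_cast; ring,
      PySem.List.pyRange_one_succ_right (by omega : (1 : Int) ≤ ((K : Nat) : Int) + 1),
      List.foldl_append, ih L, List.foldl_cons, List.foldl_nil,
      show ((K : Nat) : Int) + 1 = ((K + 1 : Nat) : Int) from by push_cast; ring,
      pvStep2_eq q wi m xs pV _ hwi K]
    by_cases h : Int.fmod (pvWin xs m wi (K + 1)) q = pV
    · simp [pvCands, h, List.append_assoc]
    · simp [pvCands, h]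

theorem pvFilter (pred : Int → Bool) (f : Nat → Bool) :
    ∀ (K : Nat), (∀ k : Nat, k ≤ K → pred ((k : Nat) : Int) = f k) →
    (PySem.List.pyRange 0 ((K : Int) + 1) 1).filter pred
      = (if f 0 then [(0 : Int)] else []) ++ pvCands f K := by
  intro K
  induction K with
  | zero =>
    intro h
    have h0 := h 0 (le_refl 0)
    rw [show ((0 : Nat) : Int) + 1 = (0 : Int) + 1 from by norm_num,
      PySem.List.pyRange_one_singleton]
    simp only [List.filter]
    rw [show (0 : Int) = ((0 : Nat) : Int) from by norm_num, h0]
    cases hf : f 0 <;> simp [pvCands]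
  | succ K ih =>
    intro h
    rw [show ((K + 1 : Nat) : Int) + 1 = (((K : Nat) : Int) + 1) + 1 from by push_cast; ring,
      PySem.List.pyRange_one_succ_right (by omega : (0 : Int) ≤ ((K : Nat) : Int) + 1),
      List.filter_append, ih (fun k hk => h k (by omega))]
    have hK1 := h (K + 1) (le_refl _)
    rw [show ((K : Nat) : Int) + 1 = ((K + 1 : Nat) : Int) from by push_cast; ring]
    simp only [List.filter, hK1]
    cases hf : f (K + 1) <;> simp [pvCands, hf, List.append_assoc]

-- ===== VERDICT (by name: the statement is the Claim_ definition above) =====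
theorem modPatternMatchWildcard_spec : Claim_equal_modPatternMatchWildcard := by
  unfold Claim_equal_modPatternMatchWildcard
  intro q p x _ hpre
  unfold Spec_modPatternMatchWildcard
  obtain ⟨hq, hmem, hmn⟩ := hpre
  obtain ⟨wi, hidx⟩ := Option.isSome_iff_exists.mp ((PySem.List.index?_isSome_iff _ _).mpr hmem)
  obtain ⟨hwi, -, -⟩ := PySem.List.getElem_of_index?_eq_some hidx
  unfold modPatternMatchWildcard modPatternMatchWildcard_alt
  dsimp only
  rw [hidx]
  dsimp only
  rw [pvFold1 q wi p.toList x.toList hmn]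
  have htake : (x.toList.take p.toList.length).length = p.toList.length := by
    rw [List.length_take]; omega
  have hget : ∀ j < p.toList.length,
      (x.toList.take p.toList.length).getD j ' ' = x.toList.getD (0 + j) ' ' := by
    intro j hj
    rw [Nat.zero_add]
    exact pv_getD_take x.toList p.toList.length j hj
  rw [pvRawSum_eq_win wi (x.toList.take p.toList.length) x.toList p.toList.length 0 htake hget]
  dsimp only
  simp only [PySem.List.len_eq]
  rw [show (x.toList.length : Int) - (p.toList.length : Int) + 1
      = ((x.toList.length - p.toList.length : Nat) : Int) + 1 from by omega]
  rw [pvLoop2 q wi p.toList.length x.toList (Int.fmod (pvRawSum wi 0 p.toList) q) hwi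
    (x.toList.length - p.toList.length)
    (if Int.fmod (pvWin x.toList p.toList.length wi 0) q
        = Int.fmod (pvRawSum wi 0 p.toList) q then [0] else [])]
  dsimp only
  rw [pvFilter
    (fun i => decide (pvHash q wi (PySem.List.slice x.toList (some i)
        (some (i + (p.toList.length : Int)))) = pvHash q wi p.toList))
    (fun k => decide (Int.fmod (pvWin x.toList p.toList.length wi k) q
        = Int.fmod (pvRawSum wi 0 p.toList) q))
    (x.toList.length - p.toList.length)
    (by
      intro k hk
      simp only
      rw [pvWindowHash q wi x.toList p.toList.length k (by omega), pvHash_eq q wi p.toList])]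
  by_cases h0 : Int.fmod (pvWin x.toList p.toList.length wi 0) q
      = Int.fmod (pvRawSum wi 0 p.toList) q <;> simp only [h0, if_true, if_false] <;> simp
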